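-- pv_equiv track=rewrite | github.com/SurvivingJ/LinguaLoop-web | Portal/MusicDojo/slonimsky_generator.py | generate_pitch_sequence
-- ===== SOURCE A (Python) =====
-- def generate_pitch_sequence(start_midi, division_semitones, interpolation_offsets):
--     """
--     Generate a pitch sequence using Slonimsky's system.
--
--     Args:
--         start_midi: Starting MIDI note number
--         division_semitones: Interval between principal tones
--         interpolation_offsets: List of semitone offsets to insert between principals
--
--     Returns:
--         List of MIDI note numbers
--     """
--     sequence = []
--     # Generate principal tones spanning 2 octaves (24 semitones)
--     current = start_midi
--     principals = []
--     while current <= start_midi + 24: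
--         principals.append(current)
--         current += division_semitones
--
--     # Insert interpolation notes between each pair of principal tones
--     for i, principal in enumerate(principals):
--         sequence.append(principal)
--         # Add interpolation notes (except after the last principal)
--         if i < len(principals) - 1:
--             for offset in interpolation_offsets:
--                 interp_note = principal + offset
--                 # Keep interpolation within range
--                 if start_midi - 12 <= interp_note <= start_midi + 36:
--                     sequence.append(interp_note)
--
--     return sequence
-- ===== SOURCE B (Python) =====
-- def generate_pitch_sequence(start_midi, division_semitones, interpolation_offsets):
--     """Recursive descent over the principal tones: each call emits one principal,
--     decides by look-ahead whether it is the last one, and otherwise emits the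
--     in-range interpolation notes (a comprehension) before recursing on the next
--     principal.  No intermediate principals list, no index bookkeeping."""
--     lo = start_midi - 12
--     hi = start_midi + 36
--     limit = start_midi + 24
--
--     def rec(p):
--         if p + division_semitones > limit:
--             return [p]
--         return ([p]
--                 + [p + o for o in interpolation_offsets if lo <= p + o <= hi]
--                 + rec(p + division_semitones))
--
--     return rec(start_midi)
-- ===== Notes on version B (the rewrite author's own statement) =====
-- stated objective: alternative
-- what changed: Replaces the two staged passes (while-loop building a principals list, then an enumerate/len-indexed loop over it) by a recursive descent that emits one principal per call, uses a look-ahead comparison instead of an index to detect the last principal, and produces interpolation notes with a filtered comprehension.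
import Mathlib
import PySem

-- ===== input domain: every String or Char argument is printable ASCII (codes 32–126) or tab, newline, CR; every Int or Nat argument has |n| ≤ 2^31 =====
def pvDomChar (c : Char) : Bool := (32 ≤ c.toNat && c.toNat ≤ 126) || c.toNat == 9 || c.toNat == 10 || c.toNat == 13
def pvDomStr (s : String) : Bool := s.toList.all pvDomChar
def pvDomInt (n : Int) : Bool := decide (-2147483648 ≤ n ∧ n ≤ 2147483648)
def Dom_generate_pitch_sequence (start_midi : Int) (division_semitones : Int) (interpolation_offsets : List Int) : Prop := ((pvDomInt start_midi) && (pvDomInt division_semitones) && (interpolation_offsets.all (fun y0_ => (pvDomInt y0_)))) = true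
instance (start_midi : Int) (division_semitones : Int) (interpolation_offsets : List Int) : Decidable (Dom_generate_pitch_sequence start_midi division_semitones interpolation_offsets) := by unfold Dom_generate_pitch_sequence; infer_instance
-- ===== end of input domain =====

-- B replaces A's two staged passes (while-built principals list + enumerate/len loop)
-- by a recursive descent emitting one principal per call with a look-ahead last test; objective: alternative.


-- ===== PORT A =====
-- Python's `while current <= start_midi + 24: principals.append(current); current += division_semitones`,
-- made total with a fuel argument: for division_semitones ≥ 1 the loop runs at most 25 iterations
-- (+1 final test), so fuel 26 is never exhausted; for division_semitones ≤ 0 Python never terminates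
-- (excluded by Pre_) and the fuel only makes the recursion total.
def pvPrincLoop (start_midi : Int) (division_semitones : Int) : Nat → Int → List Int
  | 0, _ => []
  | fuel + 1, current =>
    if current ≤ start_midi + 24 then
      current :: pvPrincLoop start_midi division_semitones fuel (current + division_semitones)
    else []

def generate_pitch_sequence (start_midi : Int) (division_semitones : Int) (interpolation_offsets : List Int) : List Int :=
  let principals := pvPrincLoop start_midi division_semitones 26 start_midi
  (PySem.List.enumerate principals 0).foldl (fun sequence ip =>
    let sequence := sequence ++ [ip.2]
    if ip.1 < (principals.length : Int) - 1 then
      interpolation_offsets.foldl (fun seq offset =>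
        let interp_note := ip.2 + offset
        if start_midi - 12 ≤ interp_note ∧ interp_note ≤ start_midi + 36 then seq ++ [interp_note]
        else seq) sequence
    else sequence) []

-- ===== PORT B =====
-- `[p + o for o in offs if lo <= p + o <= hi]` (comprehension = filter + map)
def pvInterpB (lo hi : Int) (offs : List Int) (p : Int) : List Int :=
  (offs.filter (fun o => decide (lo ≤ p + o ∧ p + o ≤ hi))).map (fun o => p + o)

-- the inner `rec` of Source B, made total with fuel: for division_semitones ≥ 1 the recursion depth is
-- at most 25, so fuel 25 is never exhausted; for division_semitones ≤ 0 the Python recursion never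
-- terminates (excluded by Pre_) and the fuel only makes it total.
def pvRecB (s d : Int) (offs : List Int) : Nat → Int → List Int
  | 0, p => [p]
  | fuel + 1, p =>
    if p + d > s + 24 then [p]
    else [p] ++ pvInterpB (s - 12) (s + 36) offs p ++ pvRecB s d offs fuel (p + d)

def generate_pitch_sequence_alt (start_midi : Int) (division_semitones : Int) (interpolation_offsets : List Int) : List Int :=
  pvRecB start_midi division_semitones interpolation_offsets 25 start_midi

-- ===== PRECONDITION & SPEC =====
-- Pre_ excludes division_semitones ≤ 0, on which Python A's while loop never terminates
-- (and B's recursion never terminates either); A returns on no such input.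
def Pre_generate_pitch_sequence (start_midi : Int) (division_semitones : Int) (interpolation_offsets : List Int) : Prop := 1 ≤ division_semitones
instance (start_midi : Int) (division_semitones : Int) (interpolation_offsets : List Int) : Decidable (Pre_generate_pitch_sequence start_midi division_semitones interpolation_offsets) := by unfold Pre_generate_pitch_sequence; infer_instance
def pvWitness_generate_pitch_sequence : Int × Int × List Int := (60, 4, [1, 2, 30])

def Spec_generate_pitch_sequence (start_midi : Int) (division_semitones : Int) (interpolation_offsets : List Int) (out : List Int) : Prop := out = generate_pitch_sequence_alt start_midi division_semitones interpolation_offsets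
instance (start_midi : Int) (division_semitones : Int) (interpolation_offsets : List Int) (out : List Int) : Decidable (Spec_generate_pitch_sequence start_midi division_semitones interpolation_offsets out) := by unfold Spec_generate_pitch_sequence; infer_instance

-- ===== CLAIM (what is proved, stated in full; the proofs are below) =====
def Claim_equal_generate_pitch_sequence : Prop := ∀ (start_midi : Int) (division_semitones : Int) (interpolation_offsets : List Int), Dom_generate_pitch_sequence start_midi division_semitones interpolation_offsets → Pre_generate_pitch_sequence start_midi division_semitones interpolation_offsets → Spec_generate_pitch_sequence start_midi division_semitones interpolation_offsets (generate_pitch_sequence start_midi division_semitones interpolation_offsets)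

-- ===== LEMMAS AND PROOFS =====

theorem pv_inner_eq (s p : Int) (offs : List Int) : ∀ (acc : List Int),
    offs.foldl (fun seq o =>
      if s - 12 ≤ p + o ∧ p + o ≤ s + 36 then seq ++ [p + o] else seq) acc
    = acc ++ pvInterpB (s - 12) (s + 36) offs p := by
  induction offs with
  | nil => intro acc; simp [pvInterpB]
  | cons o t ih =>
    intro acc
    rw [List.foldl_cons]
    by_cases h : s - 12 ≤ p + o ∧ p + o ≤ s + 36
    · rw [if_pos h, ih]
      simp only [pvInterpB, List.filter_cons, decide_eq_true h, if_true, List.map_cons,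
        List.append_assoc, List.singleton_append]
    · rw [if_neg h, ih]
      simp only [pvInterpB, List.filter_cons, decide_eq_false h, Bool.false_eq_true, if_false]

theorem pv_foldA (s m : Int) (offs : List Int) (l : List (Int × Int)) : ∀ (acc : List Int),
    l.foldl (fun sequence ip =>
      let sequence := sequence ++ [ip.2]
      if ip.1 < m then
        offs.foldl (fun seq o =>
          if s - 12 ≤ ip.2 + o ∧ ip.2 + o ≤ s + 36 then seq ++ [ip.2 + o] else seq) sequence
      else sequence) acc
    = acc ++ l.flatMap (fun ip => ip.2 :: (if ip.1 < m then pvInterpB (s - 12) (s + 36) offs ip.2 else [])) := by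
  induction l with
  | nil => intro acc; simp
  | cons x t ih =>
    intro acc
    rw [List.foldl_cons, ih, List.flatMap_cons]
    by_cases h : x.1 < m
    · simp only [h, if_true, pv_inner_eq]
      simp
    · simp only [h, if_false]
      simp

theorem pv_flatMap_enum_snd {α β : Type} (h : α → List β) (L : List α) : ∀ (a : Int),
    (PySem.List.enumerate L a).flatMap (fun ip => h ip.2) = L.flatMap h := by
  induction L with
  | nil => intro a; simp [PySem.List.enumerate_nil]
  | cons x t ih => intro a; simp [PySem.List.enumerate_cons, ih]

theorem pv_princ_eq (s d : Int) (hd : 1 ≤ d) : ∀ (n : Nat) (fuel : Nat) (c : Int),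
    c ≤ s + 24 → ((s + 24 - c) / d).toNat = n → n + 2 ≤ fuel →
    pvPrincLoop s d fuel c = (List.range (n + 1)).map (fun k : Nat => c + (k : Int) * d) := by
  intro n
  induction n with
  | zero =>
    intro fuel c hc hn hf
    have hq0 : 0 ≤ (s + 24 - c) / d := Int.ediv_nonneg (by omega) (by omega)
    have hq : (s + 24 - c) / d = 0 := by omega
    have hlt : s + 24 - c < d := by
      by_contra hx
      push_neg at hx
      have : 1 ≤ (s + 24 - c) / d := (Int.le_ediv_iff_mul_le (by omega)).mpr (by omega)
      omega
    obtain ⟨f, rfl⟩ : ∃ f, fuel = f + 1 + 1 := ⟨fuel - 2, by omega⟩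
    simp only [pvPrincLoop, if_pos hc, if_neg (show ¬ c + d ≤ s + 24 by omega)]
    simp
  | succ n ih =>
    intro fuel c hc hn hf
    have hq0 : 0 ≤ (s + 24 - c) / d := Int.ediv_nonneg (by omega) (by omega)
    have hq : (s + 24 - c) / d = (n : Int) + 1 := by omega
    have hcd : c + d ≤ s + 24 := by
      by_contra hx
      push_neg at hx
      have : (s + 24 - c) / d = 0 := Int.ediv_eq_zero_of_lt (by omega) (by omega)
      omega
    have hstep : ((s + 24 - (c + d)) / d).toNat = n := by
      have he : s + 24 - (c + d) = (s + 24 - c) + (-1) * d := by ring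
      rw [he, Int.add_mul_ediv_right _ _ (show d ≠ 0 by omega), hq]
      omega
    obtain ⟨f, rfl⟩ : ∃ f, fuel = f + 1 := ⟨fuel - 1, by omega⟩
    simp only [pvPrincLoop, if_pos hc]
    rw [ih f (c + d) hcd hstep (by omega)]
    have hr : (List.range (n+1+1)).map (fun k : Nat => c + (k:Int)*d)
        = (c + ((0:Nat):Int)*d) :: (List.range (n+1)).map (fun k : Nat => (c + d) + (k:Int)*d) := by
      rw [show List.range (n+1+1) = 0 :: List.map Nat.succ (List.range (n+1)) from List.range_succ_eq_map, List.map_cons, List.map_map]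
      refine congrArg (List.cons _) (List.map_congr_left ?_)
      intro k _
      simp only [Function.comp_apply]
      push_cast
      ring
    rw [hr]
    norm_num

theorem pv_recB_eq (s d : Int) (offs : List Int) (hd : 1 ≤ d) : ∀ (n : Nat) (fuel : Nat) (c : Int),
    c ≤ s + 24 → ((s + 24 - c) / d).toNat = n → n + 1 ≤ fuel →
    pvRecB s d offs fuel c
      = (List.range n).flatMap (fun k : Nat => (c + (k : Int) * d) :: pvInterpB (s - 12) (s + 36) offs (c + (k : Int) * d))
        ++ [c + (n : Int) * d] := by
  intro n
  induction n with
  | zero =>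
    intro fuel c hc hn hf
    have hq0 : 0 ≤ (s + 24 - c) / d := Int.ediv_nonneg (by omega) (by omega)
    have hq : (s + 24 - c) / d = 0 := by omega
    have hlt : s + 24 - c < d := by
      by_contra hx
      push_neg at hx
      have : 1 ≤ (s + 24 - c) / d := (Int.le_ediv_iff_mul_le (by omega)).mpr (by omega)
      omega
    obtain ⟨f, rfl⟩ : ∃ f, fuel = f + 1 := ⟨fuel - 1, by omega⟩
    simp only [pvRecB, if_pos (show c + d > s + 24 by omega)]
    simp
  | succ n ih =>
    intro fuel c hc hn hf
    have hq0 : 0 ≤ (s + 24 - c) / d := Int.ediv_nonneg (by omega) (by omega)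
    have hq : (s + 24 - c) / d = (n : Int) + 1 := by omega
    have hcd : c + d ≤ s + 24 := by
      by_contra hx
      push_neg at hx
      have : (s + 24 - c) / d = 0 := Int.ediv_eq_zero_of_lt (by omega) (by omega)
      omega
    have hstep : ((s + 24 - (c + d)) / d).toNat = n := by
      have he : s + 24 - (c + d) = (s + 24 - c) + (-1) * d := by ring
      rw [he, Int.add_mul_ediv_right _ _ (show d ≠ 0 by omega), hq]
      omega
    obtain ⟨f, rfl⟩ : ∃ f, fuel = f + 1 := ⟨fuel - 1, by omega⟩
    simp only [pvRecB, if_neg (show ¬ c + d > s + 24 by omega)]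
    rw [ih f (c + d) hcd hstep (by omega)]
    have hr : List.range (n+1) = 0 :: List.map Nat.succ (List.range n) := List.range_succ_eq_map
    rw [hr, List.flatMap_cons, List.flatMap_map]
    have hcongr : (List.range n).flatMap
          (fun k : Nat => ((c + d) + (k : Int) * d) :: pvInterpB (s - 12) (s + 36) offs ((c + d) + (k : Int) * d))
        = (List.range n).flatMap
          (fun k : Nat => (c + ((k.succ : Nat) : Int) * d) :: pvInterpB (s - 12) (s + 36) offs (c + ((k.succ : Nat) : Int) * d)) := by
      apply List.flatMap_congr
      intro k _
      have : c + ((k.succ : Nat) : Int) * d = (c + d) + (k : Int) * d := by push_cast; ring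
      rw [this]
    rw [hcongr]
    have hlast : (c + d) + (n : Int) * d = c + ((n : Nat) + 1 : Int) * d := by push_cast; ring
    simp [hlast]

-- ===== VERDICT (by name: the statement is the Claim_ definition above) =====
theorem generate_pitch_sequence_spec : Claim_equal_generate_pitch_sequence := by
  intro s d offs _dom hpre
  unfold Pre_generate_pitch_sequence at hpre
  unfold Spec_generate_pitch_sequence
  set n : Nat := ((24 : Int) / d).toNat with hn
  have hn' : ((s + 24 - s) / d).toNat = n := by norm_num [hn]
  have hn24 : n ≤ 24 := by
    have h1 : (24 : Int) / d ≤ 24 := @Int.ediv_le_self 24 d (by norm_num)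
    omega
  have hprinc : pvPrincLoop s d 26 s = (List.range (n + 1)).map (fun k : Nat => s + (k : Int) * d) :=
    pv_princ_eq s d hpre n 26 s (by omega) hn' (by omega)
  set F : Nat → List Int := fun k => (s + (k : Int) * d) :: pvInterpB (s - 12) (s + 36) offs (s + (k : Int) * d) with hF
  have hA : generate_pitch_sequence s d offs
      = (List.range n).flatMap F ++ [s + (n : Int) * d] := by
    simp only [generate_pitch_sequence]
    rw [hprinc, pv_foldA]
    rw [show List.range (n + 1) = List.range n ++ [n] from List.range_succ, List.map_append]
    rw [PySem.List.enumerate_append, List.flatMap_append]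
    have hlen : ((List.range n).map (fun k : Nat => s + (k : Int) * d)).length = n := by simp
    have hm : (((List.range n).map (fun k : Nat => s + (k : Int) * d) ++
        List.map (fun k : Nat => s + (k : Int) * d) [n]).length : Int) - 1 = (n : Int) := by
      simp
    rw [hm]
    have htail : PySem.List.enumerate (List.map (fun k : Nat => s + (k : Int) * d) [n])
        (0 + ((List.range n).map (fun k : Nat => s + (k : Int) * d)).length)
        = [((n : Int), s + (n : Int) * d)] := by
      rw [hlen]
      simp [PySem.List.enumerate_cons, PySem.List.enumerate_nil]
    rw [htail]
    have hlast : List.flatMap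
        (fun ip : Int × Int => ip.2 :: (if ip.1 < (n : Int) then pvInterpB (s - 12) (s + 36) offs ip.2 else []))
        [((n : Int), s + (n : Int) * d)] = [s + (n : Int) * d] := by
      simp
    rw [hlast]
    have hhead : List.flatMap
        (fun ip : Int × Int => ip.2 :: (if ip.1 < (n : Int) then pvInterpB (s - 12) (s + 36) offs ip.2 else []))
        (PySem.List.enumerate ((List.range n).map (fun k : Nat => s + (k : Int) * d)) 0)
        = (List.range n).flatMap F := by
      have h1 := pv_flatMap_enum_snd (fun p : Int => p :: pvInterpB (s - 12) (s + 36) offs p)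
          ((List.range n).map (fun k : Nat => s + (k : Int) * d)) 0
      rw [List.flatMap_congr (g := fun ip : Int × Int => ip.2 :: pvInterpB (s - 12) (s + 36) offs ip.2) ?_]
      · exact h1.trans (by rw [List.flatMap_map])
      · intro ip hip
        rcases (PySem.List.mem_enumerate_iff _ _ _).mp hip with ⟨k, hk, hik⟩
        have hk' : k < n := by simpa using hk
        have : ip.1 < (n : Int) := by
          rw [hik]
          simp
          omega
        simp [this]
    rw [hhead]
    simp
  have hB : generate_pitch_sequence_alt s d offs
      = (List.range n).flatMap F ++ [s + (n : Int) * d] := by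
    simp only [generate_pitch_sequence_alt]
    exact pv_recB_eq s d offs hpre n 25 s (by omega) hn' (by omega)
  rw [hA, hB]
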